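-- pv_equiv track=rewrite | github.com/BrettRey/erdos-problem-993 | fit_round19_shifted_reserve.py | tree_dp
-- ===== SOURCE A (Python) =====
-- def poly_mul(a: list[int], b: list[int]) -> list[int]:
--     c = [0] * (len(a) + len(b) - 1)
--     for i, ai in enumerate(a):
--         if ai == 0:
--             continue
--         for j, bj in enumerate(b):
--             c[i + j] += ai * bj
--     return c
--
-- def tree_dp(adj: list[list[int]], root: int):
--     n = len(adj)
--     children = [[] for _ in range(n)]
--     order = []
--     vis = [False] * n
--     stack = [root]
--     vis[root] = True
--     while stack:
--         v = stack.pop()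
--         order.append(v)
--         for u in adj[v]:
--             if not vis[u]:
--                 vis[u] = True
--                 children[v].append(u)
--                 stack.append(u)
--     I = [None] * n
--     E = [None] * n
--     J = [None] * n
--     for v in reversed(order):
--         if not children[v]:
--             E[v] = [1]
--             J[v] = [1]
--             I[v] = [1, 1]
--             continue
--         ev = [1]
--         jv = [1]
--         for c in children[v]:
--             ev = poly_mul(ev, I[c])
--             jv = poly_mul(jv, E[c])
--         E[v] = ev
--         J[v] = jv
--         deg = max(len(ev), len(jv) + 1)
--         iv = [0] * deg
--         for i, val in enumerate(ev):
--             iv[i] += val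
--         for i, val in enumerate(jv):
--             iv[i + 1] += val
--         I[v] = iv
--     return I, E, J, children
-- ===== SOURCE B (Python) =====
-- # B: recursive post-order DFS; claims children first (so child assignment matches the
-- # LIFO stack discipline), recurses into them in reverse adjacency order, and computes
-- # the polynomials on the way back up -- no explicit stack, no `order` list, no second pass.
-- # Note: on very deep trees this recursion can hit Python's recursion limit where the
-- # iterative original does not.
--
-- def poly_mul(a: list[int], b: list[int]) -> list[int]:
--     c = [0] * (len(a) + len(b) - 1)
--     for i, ai in enumerate(a):
--         if ai == 0:
--             continue
--         for j, bj in enumerate(b):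
--             c[i + j] += ai * bj
--     return c
--
-- def tree_dp(adj: list[list[int]], root: int):
--     n = len(adj)
--     children = [[] for _ in range(n)]
--     vis = [False] * n
--     I = [None] * n
--     E = [None] * n
--     J = [None] * n
--     vis[root] = True
--
--     def visit(v):
--         cs = children[v]
--         for u in adj[v]:
--             if not vis[u]:
--                 vis[u] = True
--                 cs.append(u)
--         for u in reversed(cs):
--             visit(u)
--         if not cs:
--             E[v] = [1]
--             J[v] = [1]
--             I[v] = [1, 1]
--             return
--         ev = [1]
--         jv = [1]
--         for c in cs:
--             ev = poly_mul(ev, I[c])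
--             jv = poly_mul(jv, E[c])
--         E[v] = ev
--         J[v] = jv
--         deg = max(len(ev), len(jv) + 1)
--         iv = [0] * deg
--         for i, val in enumerate(ev):
--             iv[i] += val
--         for i, val in enumerate(jv):
--             iv[i + 1] += val
--         I[v] = iv
--
--     visit(root)
--     return I, E, J, children
-- ===== Notes on version B (the rewrite author's own statement) =====
-- stated objective: alternative
-- what changed: Replaced the explicit-stack traversal plus separate reverse-order DP pass by a single recursive post-order DFS that claims children, recurses in reverse adjacency order (matching the LIFO discipline exactly, even on cyclic/multigraph inputs), and computes the polynomials on the unwind, eliminating the order list and the second pass.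
import Mathlib
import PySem

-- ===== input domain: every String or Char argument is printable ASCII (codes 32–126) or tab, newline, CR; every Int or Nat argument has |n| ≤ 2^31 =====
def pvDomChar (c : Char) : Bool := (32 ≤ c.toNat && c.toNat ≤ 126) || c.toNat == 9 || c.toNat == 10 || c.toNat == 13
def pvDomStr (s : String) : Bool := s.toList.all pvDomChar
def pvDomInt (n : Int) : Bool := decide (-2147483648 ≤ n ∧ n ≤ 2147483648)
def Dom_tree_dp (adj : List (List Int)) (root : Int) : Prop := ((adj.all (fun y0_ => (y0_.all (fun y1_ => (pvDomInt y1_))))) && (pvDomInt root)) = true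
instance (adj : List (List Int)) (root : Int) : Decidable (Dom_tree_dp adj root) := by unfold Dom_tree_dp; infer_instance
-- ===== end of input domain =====

-- B replaces A's explicit-stack traversal + separate reverse-order DP pass by one recursive
-- post-order DFS computing the polynomials on the unwind (same return value; A mutates nothing).

-- ===== PORT A =====
-- poly_mul, shared verbatim by both Python versions
def polyMul (a b : List Int) : List Int :=
  (PySem.List.enumerate a).foldl (fun c p =>
    if p.2 = 0 then c
    else (PySem.List.enumerate b).foldl
      (fun c q => PySem.List.pySetD c (p.1 + q.1) (PySem.List.pyGetD c (p.1 + q.1) 0 + p.2 * q.2)) c)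
    (List.replicate (a.length + b.length - 1) (0 : Int))

-- the `for u in adj[v]` marking loop, textually identical in both Pythons: marks unvisited u,
-- appends it to children[v], and records it (A pushes the record on the stack, B recurses on it);
-- out-of-range reads/writes (where Python raises, excluded by Pre_) are no-ops via pyGetD/pySetD
def claimAt (vis : List Bool) (ch : List (List Int)) (v : Int) (nbrs : List Int) :
    List Bool × List (List Int) × List Int :=
  nbrs.foldl (fun st u =>
    if PySem.List.pyGetD st.1 u true = false then
      (PySem.List.pySetD st.1 u true,
       PySem.List.pySetD st.2.1 v (PySem.List.pyGetD st.2.1 v [] ++ [u]),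
       st.2.2 ++ [u])
    else st) (vis, ch, [])

-- the per-node polynomial combination, textually identical in both Pythons
-- (the body of A's reversed-order loop; in B it runs right after the recursive calls return)
def dpVal (cs : List Int) (I E : List (List Int)) : List Int × List Int × List Int :=
  if cs = [] then ([1, 1], [1], [1])
  else
    let p := cs.foldl (fun p c =>
      (polyMul p.1 (PySem.List.pyGetD I c []), polyMul p.2 (PySem.List.pyGetD E c []))) ([1], [1])
    let deg := max p.1.length (p.2.length + 1)
    let iv := (PySem.List.enumerate p.1).foldl
      (fun iv q => PySem.List.pySetD iv q.1 (PySem.List.pyGetD iv q.1 0 + q.2))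
      (List.replicate deg (0 : Int))
    let iv := (PySem.List.enumerate p.2).foldl
      (fun iv q => PySem.List.pySetD iv (q.1 + 1) (PySem.List.pyGetD iv (q.1 + 1) 0 + q.2)) iv
    (iv, p.1, p.2)

def dpAt (cs : List Int) (I E J : List (List Int)) (v : Int) :
    List (List Int) × List (List Int) × List (List Int) :=
  (PySem.List.pySetD I v (dpVal cs I E).1, PySem.List.pySetD E v (dpVal cs I E).2.1,
   PySem.List.pySetD J v (dpVal cs I E).2.2)

def cfalse (vis : List Bool) : Nat := vis.count false

-- marking one false entry decreases the false-count by one (any index form, incl. wraparound)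
theorem cfalse_flip (xs : List Bool) (i : Int) (h : PySem.List.pyGetD xs i true = false) :
    cfalse (PySem.List.pySetD xs i true) + 1 = cfalse xs := by
  unfold cfalse
  simp only [PySem.List.pyGetD, PySem.List.pyGet?] at h
  simp only [PySem.List.pySetD, PySem.List.pySet?]
  cases hx : PySem.List.pyIdx? xs.length i with
  | none => rw [hx] at h; simp at h
  | some k =>
    rw [hx] at h
    simp only [Option.bind_some] at h
    have hk : xs[k]? = some false := by
      cases hg : xs[k]? with
      | none => rw [hg] at h; simp at h
      | some b => rw [hg] at h; simpa using h
    have hlt : k < xs.length := (List.getElem?_eq_some_iff.mp hk).1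
    have hgk : xs[k] = false := by
      have h2 := List.getElem?_eq_getElem hlt
      rw [h2] at hk; exact Option.some.inj hk
    have hmem : false ∈ xs := hgk ▸ List.getElem_mem hlt
    have hpos : 0 < List.count false xs := List.count_pos_iff.mpr hmem
    simp [List.count_set hlt, hgk]
    omega

-- the accumulator of the claim fold only collects
theorem claimAt_acc (v : Int) (nbrs : List Int) :
    ∀ (vis : List Bool) (ch : List (List Int)) (acc : List Int),
    nbrs.foldl (fun st u =>
      if PySem.List.pyGetD st.1 u true = false then
        (PySem.List.pySetD st.1 u true,
         PySem.List.pySetD st.2.1 v (PySem.List.pyGetD st.2.1 v [] ++ [u]),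
         st.2.2 ++ [u])
      else st) (vis, ch, acc) =
    ((claimAt vis ch v nbrs).1, (claimAt vis ch v nbrs).2.1, acc ++ (claimAt vis ch v nbrs).2.2) := by
  induction nbrs with
  | nil => intro vis ch acc; simp [claimAt]
  | cons u rest ih =>
    intro vis ch acc
    simp only [claimAt, List.foldl_cons]
    by_cases hu : PySem.List.pyGetD vis u true = false
    · simp only [hu]
      rw [ih, ih]
      simp [claimAt]
    · simp only [hu]
      rw [ih]
      simp [claimAt]

theorem claimAt_nil (vis : List Bool) (ch : List (List Int)) (v : Int) :
    claimAt vis ch v [] = (vis, ch, []) := rfl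

theorem claimAt_cons (vis : List Bool) (ch : List (List Int)) (v : Int) (u : Int) (nbrs : List Int) :
    claimAt vis ch v (u :: nbrs) =
      if PySem.List.pyGetD vis u true = false then
        ((claimAt (PySem.List.pySetD vis u true)
            (PySem.List.pySetD ch v (PySem.List.pyGetD ch v [] ++ [u])) v nbrs).1,
         (claimAt (PySem.List.pySetD vis u true)
            (PySem.List.pySetD ch v (PySem.List.pyGetD ch v [] ++ [u])) v nbrs).2.1,
         u :: (claimAt (PySem.List.pySetD vis u true)
            (PySem.List.pySetD ch v (PySem.List.pyGetD ch v [] ++ [u])) v nbrs).2.2)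
      else claimAt vis ch v nbrs := by
  by_cases hu : PySem.List.pyGetD vis u true = false
  · rw [if_pos hu]
    show List.foldl _ _ (u :: nbrs) = _
    rw [List.foldl_cons]
    simp only [hu]
    rw [show ([] : List Int) ++ [u] = [] ++ [u] from rfl, claimAt_acc]
    simp
  · rw [if_neg hu]
    show List.foldl _ _ (u :: nbrs) = _
    rw [List.foldl_cons]
    simp only [hu]
    rfl

-- termination helper for loopA (cited in its decreasing_by): each recorded node flips one false
theorem claimAt_cf (vis : List Bool) (ch : List (List Int)) (v : Int) (nbrs : List Int) :
    cfalse (claimAt vis ch v nbrs).1 + (claimAt vis ch v nbrs).2.2.length = cfalse vis := by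
  induction nbrs generalizing vis ch with
  | nil => simp [claimAt_nil]
  | cons u rest ih =>
    rw [claimAt_cons]
    by_cases hu : PySem.List.pyGetD vis u true = false
    · simp only [hu, reduceIte, List.length_cons]
      have h1 := ih (PySem.List.pySetD vis u true)
        (PySem.List.pySetD ch v (PySem.List.pyGetD ch v [] ++ [u]))
      have h2 := cfalse_flip vis u hu
      omega
    · simp only [hu]; exact ih vis ch

-- A's while-loop: pop v, record it in `order`, claim its unvisited neighbours, push them
def loopA (adj : List (List Int)) (vis : List Bool) (ch : List (List Int))
    (ord : List Int) (stack : List Int) : List Bool × List (List Int) × List Int :=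
  match stack with
  | [] => (vis, ch, ord)
  | v :: rest =>
    let r := claimAt vis ch v (PySem.List.pyGetD adj v [])
    loopA adj r.1 r.2.1 (ord ++ [v]) (r.2.2.reverse ++ rest)
termination_by 2 * cfalse vis + stack.length
decreasing_by
  have h := claimAt_cf vis ch v (PySem.List.pyGetD adj v [])
  simp only [List.length_append, List.length_reverse, List.length_cons]
  omega

def tree_dp (adj : List (List Int)) (root : Int) :
    List (List Int) × List (List Int) × List (List Int) × List (List Int) :=
  let n := adj.length
  let r := loopA adj (PySem.List.pySetD (List.replicate n false) root true)
      (List.replicate n ([] : List Int)) [] [root]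
  -- I = E = J = [None]*n; the placeholder [] is never returned under Pre_ (every node is visited)
  let init : List (List Int) := List.replicate n []
  let dp := r.2.2.reverse.foldl
      (fun st v => dpAt (PySem.List.pyGetD r.2.1 v []) st.1 st.2.1 st.2.2 v) (init, init, init)
  (dp.1, dp.2.1, dp.2.2, r.2.1)

-- ===== PORT B =====
-- recursive post-order DFS: claim children, recurse into them in reverse adjacency order,
-- combine the polynomials on the unwind; fuel (n+1 at the top) is a totalization guard only
mutual
def visitB (adj : List (List Int)) (fuel : Nat) (vis : List Bool) (ch : List (List Int))
    (I E J : List (List Int)) (v : Int) :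
    List Bool × List (List Int) × List (List Int) × List (List Int) × List (List Int) :=
  match fuel with
  | 0 => (vis, ch, I, E, J)
  | f + 1 =>
    let r := claimAt vis ch v (PySem.List.pyGetD adj v [])
    let cs := PySem.List.pyGetD r.2.1 v []      -- cs aliases children[v] after the claim loop
    let s := visitList adj f r.1 r.2.1 I E J cs.reverse
    let d := dpAt cs s.2.2.1 s.2.2.2.1 s.2.2.2.2 v
    (s.1, s.2.1, d.1, d.2.1, d.2.2)
termination_by (fuel, 0)

def visitList (adj : List (List Int)) (fuel : Nat) (vis : List Bool) (ch : List (List Int))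
    (I E J : List (List Int)) (ws : List Int) :
    List Bool × List (List Int) × List (List Int) × List (List Int) × List (List Int) :=
  match ws with
  | [] => (vis, ch, I, E, J)
  | c :: rest =>
    let s := visitB adj fuel vis ch I E J c
    visitList adj fuel s.1 s.2.1 s.2.2.1 s.2.2.2.1 s.2.2.2.2 rest
termination_by (fuel, ws.length + 1)
end

def tree_dp_alt (adj : List (List Int)) (root : Int) :
    List (List Int) × List (List Int) × List (List Int) × List (List Int) :=
  let n := adj.length
  let init : List (List Int) := List.replicate n []
  let s := visitB adj (n + 1) (PySem.List.pySetD (List.replicate n false) root true)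
      (List.replicate n ([] : List Int)) init init init root
  (s.2.2.1, s.2.2.2.1, s.2.2.2.2, s.2.1)

-- ===== PRECONDITION & SPEC =====
-- Python's index normalisation: a negative index counts from the end
def idxN (n : Nat) (u : Int) : Nat := (if u < 0 then u + (n : Int) else u).toNat

-- one expansion step of reachability (marks every neighbour of a marked vertex)
def reachStep (adj : List (List Int)) (s : List Bool) : List Bool :=
  (List.range adj.length).foldl (fun s v =>
    if s.getD v false then
      (adj.getD v []).foldl (fun s u => s.set (idxN adj.length u) true) s
    else s) s

-- Pre_ excludes inputs where A raises IndexError (root or an adjacency entry out of range)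
-- and inputs where some vertex is unreachable from root, on which A returns None
-- placeholders — not values of the declared list-of-int-lists type.
def Pre_tree_dp (adj : List (List Int)) (root : Int) : Prop :=
  -(adj.length : Int) ≤ root ∧ root < (adj.length : Int) ∧
  (∀ row ∈ adj, ∀ u ∈ row, -(adj.length : Int) ≤ u ∧ u < (adj.length : Int)) ∧
  (reachStep adj)^[adj.length] ((List.replicate adj.length false).set (idxN adj.length root) true) =
    List.replicate adj.length true

instance (adj : List (List Int)) (root : Int) : Decidable (Pre_tree_dp adj root) := by
  unfold Pre_tree_dp; infer_instance

def pvWitness_tree_dp : List (List Int) × Int := ([[1, 2], [], []], 0)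

def Spec_tree_dp (adj : List (List Int)) (root : Int)
    (out : List (List Int) × List (List Int) × List (List Int) × List (List Int)) : Prop :=
  out = tree_dp_alt adj root

instance (adj : List (List Int)) (root : Int)
    (out : List (List Int) × List (List Int) × List (List Int) × List (List Int)) :
    Decidable (Spec_tree_dp adj root out) := by unfold Spec_tree_dp; infer_instance

-- ===== CLAIM (what is proved, stated in full; the proofs are below) =====
def Claim_equal_tree_dp : Prop := ∀ (adj : List (List Int)) (root : Int),
  Dom_tree_dp adj root → Pre_tree_dp adj root → Spec_tree_dp adj root (tree_dp adj root)

-- ===== LEMMAS AND PROOFS =====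

-- bridges: pyGetD / pySetD on an in-range (possibly negative) index are getElem?/set at idxN
theorem idxN_lt (n : Nat) (u : Int) (h1 : -(n : Int) ≤ u) (h2 : u < (n : Int)) :
    idxN n u < n := by
  unfold idxN; split_ifs <;> omega

theorem pyIdx_wrap (n : Nat) (i : Int) (h1 : -(n : Int) ≤ i) (h2 : i < (n : Int)) :
    PySem.List.pyIdx? n i = some (idxN n i) := by
  unfold PySem.List.pyIdx? idxN
  by_cases h0 : 0 ≤ i
  · rw [if_pos h0, if_pos h2, if_neg (by omega : ¬ i < 0)]
  · rw [if_neg h0, if_pos h1, if_pos (by omega : i < 0)]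
    congr 1
    omega

theorem pyGetD_wrapn {α : Type} (xs : List α) (d : α) {n : Nat} {i : Int}
    (hl : xs.length = n) (h1 : -(n : Int) ≤ i) (h2 : i < (n : Int)) :
    PySem.List.pyGetD xs i d = (xs[idxN n i]?).getD d := by
  subst hl
  simp [PySem.List.pyGetD, PySem.List.pyGet?, pyIdx_wrap xs.length i h1 h2]

theorem pySetD_wrapn {α : Type} (xs : List α) (v : α) {n : Nat} {i : Int}
    (hl : xs.length = n) (h1 : -(n : Int) ≤ i) (h2 : i < (n : Int)) :
    PySem.List.pySetD xs i v = xs.set (idxN n i) v := by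
  subst hl
  simp [PySem.List.pySetD, PySem.List.pySet?, pyIdx_wrap xs.length i h1 h2]

-- a claimed entry (pyGetD … true = false) is automatically an in-range index
theorem pyGetD_false_range (xs : List Bool) (i : Int) (h : PySem.List.pyGetD xs i true = false) :
    -(xs.length : Int) ≤ i ∧ i < (xs.length : Int) ∧ xs[idxN xs.length i]? = some false := by
  simp only [PySem.List.pyGetD, PySem.List.pyGet?] at h
  have hrange : -(xs.length : Int) ≤ i ∧ i < (xs.length : Int) := by
    by_contra hc
    have : PySem.List.pyIdx? xs.length i = none := by
      unfold PySem.List.pyIdx?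
      split_ifs <;> first | omega | rfl
    rw [this] at h; simp at h
  refine ⟨hrange.1, hrange.2, ?_⟩
  rw [pyIdx_wrap xs.length i hrange.1 hrange.2] at h
  simp only [Option.bind_some] at h
  cases hx : xs[idxN xs.length i]? with
  | none => rw [hx] at h; simp at h
  | some b => rw [hx] at h; simpa using h

-- everything the equivalence proof needs to know about one run of the claim loop
theorem claimAt_spec (n : Nat) (v : Int) :
    ∀ (nbrs : List Int) (vis : List Bool) (ch : List (List Int)),
    vis.length = n → ch.length = n →
    (claimAt vis ch v nbrs).1.length = n ∧
    (claimAt vis ch v nbrs).2.1.length = n ∧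
    (∀ u ∈ (claimAt vis ch v nbrs).2.2, u ∈ nbrs ∧ (-(n : Int) ≤ u ∧ u < (n : Int)) ∧
      vis[idxN n u]? = some false) ∧
    ((claimAt vis ch v nbrs).2.2.map (idxN n)).Nodup ∧
    (∀ i : Nat, i ∉ (claimAt vis ch v nbrs).2.2.map (idxN n) →
      (claimAt vis ch v nbrs).1[i]? = vis[i]?) ∧
    (∀ u ∈ (claimAt vis ch v nbrs).2.2, (claimAt vis ch v nbrs).1[idxN n u]? = some true) ∧
    (-(n : Int) ≤ v → v < (n : Int) → (claimAt vis ch v nbrs).2.1[idxN n v]? =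
      (ch[idxN n v]?).map (· ++ (claimAt vis ch v nbrs).2.2)) ∧
    (-(n : Int) ≤ v → v < (n : Int) → ∀ i : Nat, i ≠ idxN n v →
      (claimAt vis ch v nbrs).2.1[i]? = ch[i]?) := by
  intro nbrs
  induction nbrs with
  | nil =>
    intro vis ch hlv hlc
    simp [claimAt_nil, hlv, hlc]
  | cons u rest ih =>
    intro vis ch hlv hlc
    rw [claimAt_cons]
    by_cases hu : PySem.List.pyGetD vis u true = false
    · rw [if_pos hu]
      obtain ⟨hu1, hu2, husome⟩ := pyGetD_false_range vis u hu
      rw [hlv] at hu1 hu2 husome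
      have hult : idxN n u < n := idxN_lt n u hu1 hu2
      set vis' := PySem.List.pySetD vis u true with hvis'
      set ch' := PySem.List.pySetD ch v (PySem.List.pyGetD ch v [] ++ [u]) with hch'
      have hvis'eq : vis' = vis.set (idxN n u) true := pySetD_wrapn vis true hlv hu1 hu2
      have hlv' : vis'.length = n := by rw [hvis'eq]; simp [hlv]
      have hlc' : ch'.length = n := by rw [hch']; simp [PySem.List.length_pySetD, hlc]
      obtain ⟨l1, l2, sub, nd, fv, mk, cv, fc⟩ := ih vis' ch' hlv' hlc'
      set cs := (claimAt vis' ch' v rest).2.2 with hcs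
      have hcs_unm : ∀ w ∈ cs, w ∈ u :: rest ∧ (-(n : Int) ≤ w ∧ w < (n : Int)) ∧
          vis[idxN n w]? = some false := by
        intro w hw
        obtain ⟨hw1, hw2, hw3⟩ := sub w hw
        refine ⟨List.mem_cons_of_mem u hw1, hw2, ?_⟩
        rw [hvis'eq] at hw3
        by_cases hne : idxN n u = idxN n w
        · rw [← hne] at hw3
          have : (vis.set (idxN n u) true)[idxN n u]? = some true := by
            simp [show idxN n u < vis.length by omega]
          rw [this] at hw3; simp at hw3
        · rwa [List.getElem?_set, if_neg hne] at hw3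
      have hu_notin : idxN n u ∉ cs.map (idxN n) := by
        intro hmem
        obtain ⟨w, hw, hweq⟩ := List.mem_map.mp hmem
        obtain ⟨_, _, hw3⟩ := sub w hw
        rw [hweq, hvis'eq] at hw3
        have : (vis.set (idxN n u) true)[idxN n u]? = some true := by
          simp [show idxN n u < vis.length by omega]
        rw [this] at hw3; simp at hw3
      refine ⟨l1, l2, ?_, ?_, ?_, ?_, ?_, ?_⟩
      · intro w hw
        rcases List.mem_cons.mp hw with h | h
        · rw [h]; exact ⟨List.mem_cons_self, ⟨hu1, hu2⟩, husome⟩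
        · exact hcs_unm w h
      · simp only [List.map_cons, List.nodup_cons]
        exact ⟨hu_notin, nd⟩
      · intro i hi
        simp only [List.map_cons, List.mem_cons] at hi
        push Not at hi
        rw [fv i hi.2, hvis'eq, List.getElem?_set, if_neg (fun he => hi.1 he.symm)]
      · intro w hw
        rcases List.mem_cons.mp hw with h | h
        · rw [h, fv (idxN n u) hu_notin, hvis'eq]
          simp [show idxN n u < vis.length by omega]
        · exact mk w h
      · intro hv1 hv2
        rw [cv hv1 hv2]
        have hvlt : idxN n v < n := idxN_lt n v hv1 hv2
        have hchv : ch'[idxN n v]? = (ch[idxN n v]?).map (· ++ [u]) := by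
          rw [hch', pySetD_wrapn ch _ hlc hv1 hv2,
            pyGetD_wrapn ch [] hlc hv1 hv2, List.getElem?_set, if_pos rfl,
            if_pos (show idxN n v < ch.length by omega)]
          cases hx : ch[idxN n v]? with
          | none =>
            rw [List.getElem?_eq_getElem (show idxN n v < ch.length by omega)] at hx
            simp at hx
          | some l => simp
        rw [hchv]
        cases ch[idxN n v]? <;> simp
      · intro hv1 hv2 i hi
        rw [fc hv1 hv2 i hi, hch', pySetD_wrapn ch _ hlc hv1 hv2,
          List.getElem?_set, if_neg (fun he => hi he.symm)]
    · rw [if_neg hu]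
      obtain ⟨l1, l2, sub, nd, fv, mk, cv, fc⟩ := ih vis ch hlv hlc
      exact ⟨l1, l2, fun w hw => let ⟨a, b, c⟩ := sub w hw; ⟨List.mem_cons_of_mem u a, b, c⟩,
        nd, fv, mk, cv, fc⟩

theorem loopA_nil (adj : List (List Int)) (vis : List Bool) (ch : List (List Int)) (ord : List Int) :
    loopA adj vis ch ord [] = (vis, ch, ord) := by simp [loopA]

theorem loopA_cons (adj : List (List Int)) (vis : List Bool) (ch : List (List Int))
    (ord : List Int) (v : Int) (rest : List Int) :
    loopA adj vis ch ord (v :: rest) =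
      loopA adj (claimAt vis ch v (PySem.List.pyGetD adj v [])).1
        (claimAt vis ch v (PySem.List.pyGetD adj v [])).2.1 (ord ++ [v])
        ((claimAt vis ch v (PySem.List.pyGetD adj v [])).2.2.reverse ++ rest) := by
  rw [loopA]

theorem loopA_append (adj : List (List Int)) (vis : List Bool) (ch : List (List Int))
    (ord : List Int) (l1 : List Int) :
    ∀ l2, loopA adj vis ch ord (l1 ++ l2) =
      loopA adj (loopA adj vis ch ord l1).1 (loopA adj vis ch ord l1).2.1
        (loopA adj vis ch ord l1).2.2 l2 := by
  fun_induction loopA adj vis ch ord l1 with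
  | case1 vis ch ord => intro l2; simp
  | case2 vis ch ord v rest r ih =>
    intro l2
    rw [List.cons_append, loopA_cons, ← List.append_assoc]
    exact ih l2

theorem dpAt_len (cs : List Int) (I E J : List (List Int)) (v : Int) :
    (dpAt cs I E J v).1.length = I.length ∧ (dpAt cs I E J v).2.1.length = E.length ∧
    (dpAt cs I E J v).2.2.length = J.length := by
  unfold dpAt
  refine ⟨?_, ?_, ?_⟩ <;> simp [PySem.List.length_pySetD]

theorem dpAt_frame (cs : List Int) (I E J : List (List Int)) (v : Int) (n : Nat)
    (hlI : I.length = n) (hlE : E.length = n) (hlJ : J.length = n)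
    (hv1 : -(n : Int) ≤ v) (hv2 : v < (n : Int)) (i : Nat) (hi : i ≠ idxN n v) :
    (dpAt cs I E J v).1[i]? = I[i]? ∧ (dpAt cs I E J v).2.1[i]? = E[i]? ∧
    (dpAt cs I E J v).2.2[i]? = J[i]? := by
  unfold dpAt
  dsimp only
  refine ⟨?_, ?_, ?_⟩
  · rw [pySetD_wrapn I _ hlI hv1 hv2, List.getElem?_set, if_neg (fun he => hi he.symm)]
  · rw [pySetD_wrapn E _ hlE hv1 hv2, List.getElem?_set, if_neg (fun he => hi he.symm)]
  · rw [pySetD_wrapn J _ hlJ hv1 hv2, List.getElem?_set, if_neg (fun he => hi he.symm)]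

theorem dpAt_self (cs : List Int) (I E J : List (List Int)) (v : Int) (n : Nat)
    (hlI : I.length = n) (hlE : E.length = n) (hlJ : J.length = n)
    (hv1 : -(n : Int) ≤ v) (hv2 : v < (n : Int)) :
    (dpAt cs I E J v).1[idxN n v]? = some (dpVal cs I E).1 ∧
    (dpAt cs I E J v).2.1[idxN n v]? = some (dpVal cs I E).2.1 ∧
    (dpAt cs I E J v).2.2[idxN n v]? = some (dpVal cs I E).2.2 := by
  have hlt := idxN_lt n v hv1 hv2
  unfold dpAt
  dsimp only
  refine ⟨?_, ?_, ?_⟩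
  · rw [pySetD_wrapn I _ hlI hv1 hv2, List.getElem?_set]
    simp [show idxN n v < I.length by omega]
  · rw [pySetD_wrapn E _ hlE hv1 hv2, List.getElem?_set]
    simp [show idxN n v < E.length by omega]
  · rw [pySetD_wrapn J _ hlJ hv1 hv2, List.getElem?_set]
    simp [show idxN n v < J.length by omega]

theorem dpVal_congr (cs : List Int) (I1 E1 I2 E2 : List (List Int))
    (h : ∀ c ∈ cs, PySem.List.pyGetD I1 c [] = PySem.List.pyGetD I2 c [] ∧
      PySem.List.pyGetD E1 c [] = PySem.List.pyGetD E2 c []) :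
    dpVal cs I1 E1 = dpVal cs I2 E2 := by
  unfold dpVal
  by_cases hcs : cs = []
  · simp [hcs]
  · rw [if_neg hcs, if_neg hcs]
    have hp : cs.foldl (fun p c =>
        (polyMul p.1 (PySem.List.pyGetD I1 c []), polyMul p.2 (PySem.List.pyGetD E1 c []))) ([1], [1]) =
      cs.foldl (fun p c =>
        (polyMul p.1 (PySem.List.pyGetD I2 c []), polyMul p.2 (PySem.List.pyGetD E2 c []))) ([1], [1]) := by
      apply PySem.List.foldl_congr_mem
      intro b a ha
      rw [(h a ha).1, (h a ha).2]
    rw [hp]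


theorem visitList_nil (adj : List (List Int)) (f : Nat) (vis : List Bool)
    (ch I E J : List (List Int)) :
    visitList adj f vis ch I E J [] = (vis, ch, I, E, J) := by rw [visitList]

theorem visitList_cons (adj : List (List Int)) (f : Nat) (vis : List Bool)
    (ch I E J : List (List Int)) (c : Int) (rest : List Int) :
    visitList adj f vis ch I E J (c :: rest) =
      visitList adj f (visitB adj f vis ch I E J c).1 (visitB adj f vis ch I E J c).2.1
        (visitB adj f vis ch I E J c).2.2.1 (visitB adj f vis ch I E J c).2.2.2.1
        (visitB adj f vis ch I E J c).2.2.2.2 rest := by rw [visitList]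

theorem visitB_succ (adj : List (List Int)) (f : Nat) (vis : List Bool)
    (ch I E J : List (List Int)) (v : Int) :
    visitB adj (f + 1) vis ch I E J v =
      ((visitList adj f (claimAt vis ch v (PySem.List.pyGetD adj v [])).1
          (claimAt vis ch v (PySem.List.pyGetD adj v [])).2.1 I E J
          (PySem.List.pyGetD (claimAt vis ch v (PySem.List.pyGetD adj v [])).2.1 v []).reverse).1,
       (visitList adj f (claimAt vis ch v (PySem.List.pyGetD adj v [])).1
          (claimAt vis ch v (PySem.List.pyGetD adj v [])).2.1 I E J
          (PySem.List.pyGetD (claimAt vis ch v (PySem.List.pyGetD adj v [])).2.1 v []).reverse).2.1,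
       dpAt (PySem.List.pyGetD (claimAt vis ch v (PySem.List.pyGetD adj v [])).2.1 v [])
         (visitList adj f (claimAt vis ch v (PySem.List.pyGetD adj v [])).1
            (claimAt vis ch v (PySem.List.pyGetD adj v [])).2.1 I E J
            (PySem.List.pyGetD (claimAt vis ch v (PySem.List.pyGetD adj v [])).2.1 v []).reverse).2.2.1
         (visitList adj f (claimAt vis ch v (PySem.List.pyGetD adj v [])).1
            (claimAt vis ch v (PySem.List.pyGetD adj v [])).2.1 I E J
            (PySem.List.pyGetD (claimAt vis ch v (PySem.List.pyGetD adj v [])).2.1 v []).reverse).2.2.2.1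
         (visitList adj f (claimAt vis ch v (PySem.List.pyGetD adj v [])).1
            (claimAt vis ch v (PySem.List.pyGetD adj v [])).2.1 I E J
            (PySem.List.pyGetD (claimAt vis ch v (PySem.List.pyGetD adj v [])).2.1 v []).reverse).2.2.2.2 v) := by
  rw [visitB]

-- the heart of the proof: running A's stack loop on a pending list `ws` of already-marked,
-- child-free, distinct nodes is the same traversal as B's recursive visits, and A's
-- reversed-order DP pass over the produced segment rebuilds exactly B's arrays
theorem cruxList (adj : List (List Int)) :
    ∀ (M : Nat) (vis : List Bool) (ch I E J : List (List Int)) (ord ws : List Int) (f : Nat),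
    2 * cfalse vis + ws.length ≤ M →
    vis.length = adj.length → ch.length = adj.length →
    I.length = adj.length → E.length = adj.length → J.length = adj.length →
    (∀ w ∈ ws, -(adj.length : Int) ≤ w ∧ w < (adj.length : Int) ∧
      vis[idxN adj.length w]? = some true ∧ ch[idxN adj.length w]? = some []) →
    (ws.map (idxN adj.length)).Nodup →
    (∀ i : Nat, vis[i]? = some false → ch[i]? = some []) →
    (ws ≠ [] → cfalse vis + 1 ≤ f) →
    (visitList adj f vis ch I E J ws).1 = (loopA adj vis ch ord ws).1 ∧
    (visitList adj f vis ch I E J ws).2.1 = (loopA adj vis ch ord ws).2.1 ∧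
    (loopA adj vis ch ord ws).1.length = adj.length ∧
    (loopA adj vis ch ord ws).2.1.length = adj.length ∧
    (visitList adj f vis ch I E J ws).2.2.1.length = adj.length ∧
    (visitList adj f vis ch I E J ws).2.2.2.1.length = adj.length ∧
    (visitList adj f vis ch I E J ws).2.2.2.2.length = adj.length ∧
    cfalse (loopA adj vis ch ord ws).1 ≤ cfalse vis ∧
    ∃ t : List Int,
      (loopA adj vis ch ord ws).2.2 = ord ++ t ∧
      (∀ w ∈ ws, w ∈ t) ∧
      (∀ u ∈ t, -(adj.length : Int) ≤ u ∧ u < (adj.length : Int) ∧ (u ∈ ws ∨ vis[idxN adj.length u]? = some false)) ∧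
      (t.map (idxN adj.length)).Nodup ∧
      (∀ u ∈ t, (loopA adj vis ch ord ws).1[idxN adj.length u]? = some true) ∧
      (∀ i : Nat, i ∉ t.map (idxN adj.length) →
        (loopA adj vis ch ord ws).1[i]? = vis[i]? ∧
        (loopA adj vis ch ord ws).2.1[i]? = ch[i]? ∧
        (visitList adj f vis ch I E J ws).2.2.1[i]? = I[i]? ∧
        (visitList adj f vis ch I E J ws).2.2.2.1[i]? = E[i]? ∧
        (visitList adj f vis ch I E J ws).2.2.2.2[i]? = J[i]?) ∧
      (∀ (ch' TI TE TJ : List (List Int)),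
        ch'.length = adj.length →
        (∀ u ∈ t, ch'[idxN adj.length u]? = (loopA adj vis ch ord ws).2.1[idxN adj.length u]?) →
        TI.length = adj.length → TE.length = adj.length → TJ.length = adj.length →
        ((t.reverse.foldl (fun st v =>
            dpAt (PySem.List.pyGetD ch' v []) st.1 st.2.1 st.2.2 v)
            (TI, TE, TJ)).1.length = adj.length ∧
         (t.reverse.foldl (fun st v =>
            dpAt (PySem.List.pyGetD ch' v []) st.1 st.2.1 st.2.2 v)
            (TI, TE, TJ)).2.1.length = adj.length ∧
         (t.reverse.foldl (fun st v =>
            dpAt (PySem.List.pyGetD ch' v []) st.1 st.2.1 st.2.2 v)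
            (TI, TE, TJ)).2.2.length = adj.length ∧
         ∀ i : Nat,
          (t.reverse.foldl (fun st v =>
            dpAt (PySem.List.pyGetD ch' v []) st.1 st.2.1 st.2.2 v)
            (TI, TE, TJ)).1[i]? =
            (if i ∈ t.map (idxN adj.length) then (visitList adj f vis ch I E J ws).2.2.1[i]? else TI[i]?) ∧
          (t.reverse.foldl (fun st v =>
            dpAt (PySem.List.pyGetD ch' v []) st.1 st.2.1 st.2.2 v)
            (TI, TE, TJ)).2.1[i]? =
            (if i ∈ t.map (idxN adj.length) then (visitList adj f vis ch I E J ws).2.2.2.1[i]? else TE[i]?) ∧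
          (t.reverse.foldl (fun st v =>
            dpAt (PySem.List.pyGetD ch' v []) st.1 st.2.1 st.2.2 v)
            (TI, TE, TJ)).2.2[i]? =
            (if i ∈ t.map (idxN adj.length) then (visitList adj f vis ch I E J ws).2.2.2.2[i]? else TJ[i]?))) := by
  intro M
  induction M using Nat.strong_induction_on with
  | _ M IH =>
  intro vis ch I E J ord ws f hM hlv hlc hlI hlE hlJ hws hnd hch0 hf
  match ws with
  | [] =>
    rw [visitList_nil, loopA_nil]
    refine ⟨rfl, rfl, hlv, hlc, hlI, hlE, hlJ, Nat.le_refl _, [], by simp, by simp, by simp,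
      by simp, by simp, ?_, ?_⟩
    · intro i _; exact ⟨rfl, rfl, rfl, rfl, rfl⟩
    · intro ch' TI TE TJ _ _ hTI hTE hTJ
      exact ⟨hTI, hTE, hTJ, fun i => by simp⟩
  | w :: rest =>
  obtain ⟨hw0, hwlt, hwvis, hwch⟩ := hws w List.mem_cons_self
  have hwn : idxN adj.length w < adj.length := idxN_lt adj.length w hw0 hwlt
  obtain ⟨cl1, cl2, csub, cnd, cfv, cmk, ccv, cfc⟩ :=
    claimAt_spec adj.length w (PySem.List.pyGetD adj w []) vis ch hlv hlc
  set r := claimAt vis ch w (PySem.List.pyGetD adj w []) with hr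
  set cs := r.2.2 with hcsdef
  have hcf_r : cfalse r.1 + cs.length = cfalse vis := claimAt_cf vis ch w (PySem.List.pyGetD adj w [])
  have hfc : cfalse vis + 1 ≤ f := hf (by simp)
  have hfeq : f = (f - 1) + 1 := by omega
  have hcs_each : ∀ u ∈ cs, -(adj.length : Int) ≤ u ∧ u < (adj.length : Int) ∧
      vis[idxN adj.length u]? = some false :=
    fun u hu => ⟨(csub u hu).2.1.1, (csub u hu).2.1.2, (csub u hu).2.2⟩
  have hcs_ne_w : ∀ u ∈ cs, idxN adj.length u ≠ idxN adj.length w := by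
    intro u hu he
    have h1 := (hcs_each u hu).2.2
    rw [he, hwvis] at h1
    simp at h1
  have hcs_ch : ∀ u ∈ cs, r.2.1[idxN adj.length u]? = some [] := by
    intro u hu
    rw [cfc hw0 hwlt (idxN adj.length u) (hcs_ne_w u hu)]
    exact hch0 (idxN adj.length u) (hcs_each u hu).2.2
  have hmono_r : ∀ i : Nat, vis[i]? = some true → r.1[i]? = some true := by
    intro i hi
    have hnotin : i ∉ cs.map (idxN adj.length) := by
      intro hm
      obtain ⟨u, hu, hue⟩ := List.mem_map.mp hm
      rw [← hue] at hi
      rw [(hcs_each u hu).2.2] at hi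
      simp at hi
    rw [cfv i hnotin]; exact hi
  have hr_false : ∀ i : Nat, r.1[i]? = some false → vis[i]? = some false := by
    intro i hi
    have hnotin : i ∉ cs.map (idxN adj.length) := by
      intro hm
      obtain ⟨u, hu, hue⟩ := List.mem_map.mp hm
      rw [← hue, cmk u hu] at hi
      simp at hi
    rwa [cfv i hnotin] at hi
  have hcsB : PySem.List.pyGetD r.2.1 w [] = cs := by
    rw [pyGetD_wrapn r.2.1 [] cl2 hw0 hwlt, ccv hw0 hwlt, hwch]
    rfl
  set As := loopA adj r.1 r.2.1 (ord ++ [w]) cs.reverse with hAsdef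
  set Bs := visitList adj (f - 1) r.1 r.2.1 I E J cs.reverse with hBsdef
  set d := dpAt cs Bs.2.2.1 Bs.2.2.2.1 Bs.2.2.2.2 w with hddef
  have hA : loopA adj vis ch ord (w :: rest) = loopA adj As.1 As.2.1 As.2.2 rest := by
    rw [loopA_cons, ← hr, ← hcsdef, loopA_append]
  have hB : visitList adj f vis ch I E J (w :: rest) =
      visitList adj f Bs.1 Bs.2.1 d.1 d.2.1 d.2.2 rest := by
    conv_lhs => rw [visitList_cons, hfeq, visitB_succ, ← hr, hcsB]
    rw [← hfeq]
  -- sub-recursion (the subtree below w)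
  have SUB := IH (2 * cfalse r.1 + cs.length)
    (by simp only [List.length_cons] at hM; omega) r.1 r.2.1 I E J (ord ++ [w])
    cs.reverse (f - 1) (by rw [List.length_reverse]) cl1 cl2 hlI hlE hlJ
    (by
      intro u hu
      rw [List.mem_reverse] at hu
      exact ⟨(hcs_each u hu).1, (hcs_each u hu).2.1, cmk u hu, hcs_ch u hu⟩)
    (by rw [List.map_reverse]; exact (List.nodup_reverse).mpr cnd)
    (by
      intro i hi
      have hv := hr_false i hi
      have hne : i ≠ idxN adj.length w := by
        intro he; rw [he, hwvis] at hv; simp at hv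
      rw [cfc hw0 hwlt i hne]
      exact hch0 i hv)
    (by
      intro hne
      have : cs ≠ [] := by
        intro hc; rw [hc] at hne; simp at hne
      have : 1 ≤ cs.length := by
        cases hcse : cs with
        | nil => exact absurd hcse this
        | cons a b => simp
      omega)
  obtain ⟨sB1, sB2, sL1, sL2, sLI, sLE, sLJ, sCf, tsub, sOrd, sWs, sProp, sNd, sMk, sFr, sDP⟩ := SUB
  -- facts about the subtree segment
  have htsub_false : ∀ u ∈ tsub, vis[idxN adj.length u]? = some false := by
    intro u hu
    rcases (sProp u hu).2.2 with h | h
    · exact (hcs_each u (List.mem_reverse.mp h)).2.2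
    · exact hr_false (idxN adj.length u) h
  have hw_notin_tsub : idxN adj.length w ∉ tsub.map (idxN adj.length) := by
    intro hm
    obtain ⟨u, hu, hue⟩ := List.mem_map.mp hm
    have := htsub_false u hu
    rw [hue, hwvis] at this; simp at this
  have hdlen := dpAt_len cs Bs.2.2.1 Bs.2.2.2.1 Bs.2.2.2.2 w
  have hAs1w : As.1[idxN adj.length w]? = some true := by
    rw [(sFr (idxN adj.length w) hw_notin_tsub).1]
    exact hmono_r (idxN adj.length w) hwvis
  have hmono_As : ∀ i : Nat, r.1[i]? = some true → As.1[i]? = some true := by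
    intro i hi
    by_cases hm : i ∈ tsub.map (idxN adj.length)
    · obtain ⟨u, hu, hue⟩ := List.mem_map.mp hm
      rw [← hue]; exact sMk u hu
    · rw [(sFr i hm).1]; exact hi
  have hAs_false : ∀ i : Nat, As.1[i]? = some false → vis[i]? = some false := by
    intro i hi
    by_cases hm : i ∈ tsub.map (idxN adj.length)
    · obtain ⟨u, hu, hue⟩ := List.mem_map.mp hm
      rw [← hue, sMk u hu] at hi; simp at hi
    · exact hr_false i ((sFr i hm).1 ▸ hi)
  -- rest recursion
  have sCf' : cfalse As.1 ≤ cfalse r.1 := sCf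
  have REST := IH (2 * cfalse As.1 + rest.length)
    (by simp only [List.length_cons] at hM; omega) As.1 As.2.1 d.1 d.2.1 d.2.2
    As.2.2 rest f (Nat.le_refl _) sL1 sL2
    (hdlen.1.trans sLI) (hdlen.2.1.trans sLE) (hdlen.2.2.trans sLJ)
    (by
      intro w' hw'
      obtain ⟨h0, hlt', hvis', hch'⟩ := hws w' (List.mem_cons_of_mem w hw')
      have hne_w : idxN adj.length w' ≠ idxN adj.length w := by
        have := hnd
        simp only [List.map_cons, List.nodup_cons] at this
        intro he
        exact this.1 (List.mem_map.mpr ⟨w', hw', he⟩)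
      have hnotin : idxN adj.length w' ∉ tsub.map (idxN adj.length) := by
        intro hm
        obtain ⟨u, hu, hue⟩ := List.mem_map.mp hm
        have := htsub_false u hu
        rw [hue, hvis'] at this; simp at this
      refine ⟨h0, hlt', ?_, ?_⟩
      · rw [(sFr (idxN adj.length w') hnotin).1]
        exact hmono_r (idxN adj.length w') hvis'
      · rw [(sFr (idxN adj.length w') hnotin).2.1, cfc hw0 hwlt (idxN adj.length w') hne_w]
        exact hch')
    (by
      have := hnd
      simp only [List.map_cons, List.nodup_cons] at this
      exact this.2)
    (by
      intro i hi
      have hvisf := hAs_false i hi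
      have hne : i ≠ idxN adj.length w := by
        intro he; rw [he, hwvis] at hvisf; simp at hvisf
      have hnotin : i ∉ tsub.map (idxN adj.length) := by
        intro hm
        obtain ⟨u, hu, hue⟩ := List.mem_map.mp hm
        rw [← hue, sMk u hu] at hi; simp at hi
      rw [(sFr i hnotin).2.1, cfc hw0 hwlt i hne]
      exact hch0 i (hr_false i ((sFr i hnotin).1 ▸ hi)))
    (fun _ => by omega)
  obtain ⟨rB1, rB2, rL1, rL2, rLI, rLE, rLJ, rCf, trest, rOrd, rWs, rProp, rNd, rMk, rFr, rDP⟩ := REST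
  rw [← hAsdef] at sB1 sB2 sL1 sL2 sOrd sMk sFr sDP
  rw [← hBsdef] at sB1 sB2 sLI sLE sLJ sFr sDP
  have hcssub : ∀ u ∈ cs, u ∈ tsub := fun u hu => sWs u (List.mem_reverse.mpr hu)
  have hcsidx : ∀ i : Nat, i ∈ cs.map (idxN adj.length) → i ∈ tsub.map (idxN adj.length) := by
    intro i hi
    obtain ⟨u, hu, hue⟩ := List.mem_map.mp hi
    exact List.mem_map.mpr ⟨u, hcssub u hu, hue⟩
  have hw_notin_trest : idxN adj.length w ∉ trest.map (idxN adj.length) := by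
    intro hm
    obtain ⟨u, hu, hue⟩ := List.mem_map.mp hm
    rcases (rProp u hu).2.2 with h | h
    · have := hnd
      simp only [List.map_cons, List.nodup_cons] at this
      exact this.1 (List.mem_map.mpr ⟨u, h, hue⟩)
    · rw [hue, hAs1w] at h; simp at h
  have hdisj : ∀ i : Nat, i ∈ tsub.map (idxN adj.length) → i ∉ trest.map (idxN adj.length) := by
    intro i hisub hm
    obtain ⟨u, hu, hue⟩ := List.mem_map.mp hm
    obtain ⟨u2, hu2, hue2⟩ := List.mem_map.mp hisub
    rcases (rProp u hu).2.2 with h | h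
    · have hvt := (hws u (List.mem_cons_of_mem w h)).2.2.1
      have := htsub_false u2 hu2
      rw [hue2, ← hue, hvt] at this; simp at this
    · rw [hue, ← hue2, sMk u2 hu2] at h; simp at h
  have htmem : ∀ i : Nat, i ∈ (w :: (tsub ++ trest)).map (idxN adj.length) ↔
      (i = idxN adj.length w ∨ i ∈ tsub.map (idxN adj.length) ∨ i ∈ trest.map (idxN adj.length)) := by
    intro i
    simp only [List.map_cons, List.map_append, List.mem_cons, List.mem_append]
  -- the frame of the B-side arrays at sub-segment indices survives w's write and the rest phase
  have hBsurv : ∀ i : Nat, i ∈ tsub.map (idxN adj.length) →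
      (visitList adj f As.1 As.2.1 d.1 d.2.1 d.2.2 rest).2.2.1[i]? = Bs.2.2.1[i]? ∧
      (visitList adj f As.1 As.2.1 d.1 d.2.1 d.2.2 rest).2.2.2.1[i]? = Bs.2.2.2.1[i]? ∧
      (visitList adj f As.1 As.2.1 d.1 d.2.1 d.2.2 rest).2.2.2.2[i]? = Bs.2.2.2.2[i]? := by
    intro i hi
    have hiw : i ≠ idxN adj.length w := fun he => hw_notin_tsub (he ▸ hi)
    have hfr := rFr i (hdisj i hi)
    have hdf := dpAt_frame cs Bs.2.2.1 Bs.2.2.2.1 Bs.2.2.2.2 w adj.length sLI sLE sLJ hw0 hwlt i hiw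
    exact ⟨hfr.2.2.1.trans hdf.1, hfr.2.2.2.1.trans hdf.2.1, hfr.2.2.2.2.trans hdf.2.2⟩
  have hdw : d.1[idxN adj.length w]? = some (dpVal cs Bs.2.2.1 Bs.2.2.2.1).1 ∧
      d.2.1[idxN adj.length w]? = some (dpVal cs Bs.2.2.1 Bs.2.2.2.1).2.1 ∧
      d.2.2[idxN adj.length w]? = some (dpVal cs Bs.2.2.1 Bs.2.2.2.1).2.2 :=
    dpAt_self cs Bs.2.2.1 Bs.2.2.2.1 Bs.2.2.2.2 w adj.length sLI sLE sLJ hw0 hwlt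
  have hchAw : (loopA adj As.1 As.2.1 As.2.2 rest).2.1[idxN adj.length w]? = some cs := by
    rw [(rFr (idxN adj.length w) hw_notin_trest).2.1, (sFr (idxN adj.length w) hw_notin_tsub).2.1, ccv hw0 hwlt, hwch]
    rfl
  rw [hA, hB, sB1, sB2]
  refine ⟨rB1, rB2, rL1, rL2, rLI, rLE, rLJ, by omega, w :: (tsub ++ trest), ?_, ?_, ?_, ?_, ?_, ?_, ?_⟩
  · rw [rOrd, sOrd]; simp
  · intro w' hw'
    rcases List.mem_cons.mp hw' with h | h
    · rw [h]; exact List.mem_cons_self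
    · exact List.mem_cons_of_mem w (List.mem_append.mpr (Or.inr (rWs w' h)))
  · intro u hu
    rcases List.mem_cons.mp hu with h | h
    · rw [h]; exact ⟨hw0, hwlt, Or.inl List.mem_cons_self⟩
    · rcases List.mem_append.mp h with h2 | h2
      · exact ⟨(sProp u h2).1, (sProp u h2).2.1, Or.inr (htsub_false u h2)⟩
      · refine ⟨(rProp u h2).1, (rProp u h2).2.1, ?_⟩
        rcases (rProp u h2).2.2 with h3 | h3
        · exact Or.inl (List.mem_cons_of_mem w h3)
        · exact Or.inr (hAs_false (idxN adj.length u) h3)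
  · simp only [List.map_cons, List.map_append, List.nodup_cons]
    refine ⟨?_, List.Nodup.append sNd rNd (fun i hi hj => hdisj i hi hj)⟩
    intro hm
    rcases List.mem_append.mp hm with h | h
    · exact hw_notin_tsub h
    · exact hw_notin_trest h
  · intro u hu
    rcases List.mem_cons.mp hu with h | h
    · rw [h, (rFr (idxN adj.length w) hw_notin_trest).1]; exact hAs1w
    · rcases List.mem_append.mp h with h2 | h2
      · have hnotr : idxN adj.length u ∉ trest.map (idxN adj.length) :=
          hdisj (idxN adj.length u) (List.mem_map.mpr ⟨u, h2, rfl⟩)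
        rw [(rFr (idxN adj.length u) hnotr).1]; exact sMk u h2
      · exact rMk u h2
  · intro i hi
    rw [htmem i] at hi
    push Not at hi
    obtain ⟨hiw, hisub, hirest⟩ := hi
    have hics : i ∉ cs.map (idxN adj.length) := fun h => hisub (hcsidx i h)
    have hfr := rFr i hirest
    have hsf := sFr i hisub
    have hdf := dpAt_frame cs Bs.2.2.1 Bs.2.2.2.1 Bs.2.2.2.2 w adj.length sLI sLE sLJ hw0 hwlt i hiw
    refine ⟨?_, ?_, ?_, ?_, ?_⟩
    · rw [hfr.1, hsf.1, cfv i hics]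
    · rw [hfr.2.1, hsf.2.1, cfc hw0 hwlt i hiw]
    · rw [hfr.2.2.1, hdf.1, hsf.2.2.1]
    · rw [hfr.2.2.2.1, hdf.2.1, hsf.2.2.2.1]
    · rw [hfr.2.2.2.2, hdf.2.2, hsf.2.2.2.2]
  · -- the DP fold over the whole segment
    intro ch' TI TE TJ hlch' hag hTI hTE hTJ
    have hagR : ∀ u ∈ trest, ch'[idxN adj.length u]? = (loopA adj As.1 As.2.1 As.2.2 rest).2.1[idxN adj.length u]? :=
      fun u hu => hag u (List.mem_cons_of_mem w (List.mem_append.mpr (Or.inr hu)))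
    obtain ⟨yLI, yLE, yLJ, ypt⟩ := rDP ch' TI TE TJ hlch' hagR hTI hTE hTJ
    have hagS : ∀ u ∈ tsub, ch'[idxN adj.length u]? = As.2.1[idxN adj.length u]? := by
      intro u hu
      have hnotr : idxN adj.length u ∉ trest.map (idxN adj.length) := hdisj (idxN adj.length u) (List.mem_map.mpr ⟨u, hu, rfl⟩)
      rw [hag u (List.mem_cons_of_mem w (List.mem_append.mpr (Or.inl hu))),
        (rFr (idxN adj.length u) hnotr).2.1]
    obtain ⟨zLI, zLE, zLJ, zpt⟩ := sDP ch'
      (trest.reverse.foldl (fun st v =>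
        dpAt (PySem.List.pyGetD ch' v []) st.1 st.2.1 st.2.2 v) (TI, TE, TJ)).1
      (trest.reverse.foldl (fun st v =>
        dpAt (PySem.List.pyGetD ch' v []) st.1 st.2.1 st.2.2 v) (TI, TE, TJ)).2.1
      (trest.reverse.foldl (fun st v =>
        dpAt (PySem.List.pyGetD ch' v []) st.1 st.2.1 st.2.2 v) (TI, TE, TJ)).2.2
      hlch' hagS yLI yLE yLJ
    have hfold : (w :: (tsub ++ trest)).reverse.foldl (fun st v =>
        dpAt (PySem.List.pyGetD ch' v []) st.1 st.2.1 st.2.2 v) (TI, TE, TJ) =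
      (fun st v => dpAt (PySem.List.pyGetD ch' v []) st.1 st.2.1 st.2.2 v)
        (tsub.reverse.foldl (fun st v =>
          dpAt (PySem.List.pyGetD ch' v []) st.1 st.2.1 st.2.2 v)
          (trest.reverse.foldl (fun st v =>
            dpAt (PySem.List.pyGetD ch' v []) st.1 st.2.1 st.2.2 v) (TI, TE, TJ))) w := by
      rw [show (w :: (tsub ++ trest)).reverse = (trest.reverse ++ tsub.reverse) ++ [w] by simp,
        List.foldl_append, List.foldl_append, List.foldl_cons, List.foldl_nil]
    have hchw : PySem.List.pyGetD ch' w [] = cs := by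
      rw [pyGetD_wrapn ch' [] hlch' hw0 hwlt, hag w List.mem_cons_self, hchAw]
      rfl
    set Y := trest.reverse.foldl (fun st v =>
      dpAt (PySem.List.pyGetD ch' v []) st.1 st.2.1 st.2.2 v) (TI, TE, TJ) with hYdef
    set Z := tsub.reverse.foldl (fun st v =>
      dpAt (PySem.List.pyGetD ch' v []) st.1 st.2.1 st.2.2 v) Y with hZdef
    have hdv : dpVal cs Z.1 Z.2.1 = dpVal cs Bs.2.2.1 Bs.2.2.2.1 := by
      apply dpVal_congr
      intro c hc
      have hc1 : -(adj.length : Int) ≤ c := (hcs_each c hc).1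
      have hc2 : c < (adj.length : Int) := (hcs_each c hc).2.1
      have hcidx : idxN adj.length c ∈ tsub.map (idxN adj.length) := List.mem_map.mpr ⟨c, hcssub c hc, rfl⟩
      have hz := zpt (idxN adj.length c)
      constructor
      · rw [pyGetD_wrapn Z.1 [] zLI hc1 hc2, pyGetD_wrapn Bs.2.2.1 [] sLI hc1 hc2, hz.1, if_pos hcidx]
      · rw [pyGetD_wrapn Z.2.1 [] zLE hc1 hc2, pyGetD_wrapn Bs.2.2.2.1 [] sLE hc1 hc2, hz.2.1, if_pos hcidx]
    rw [hfold]
    dsimp only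
    rw [hchw]
    have hself := dpAt_self cs Z.1 Z.2.1 Z.2.2 w adj.length zLI zLE zLJ hw0 hwlt
    have hdlen2 := dpAt_len cs Z.1 Z.2.1 Z.2.2 w
    refine ⟨hdlen2.1.trans zLI, hdlen2.2.1.trans zLE, hdlen2.2.2.trans zLJ, ?_⟩
    intro i
    by_cases hiw : i = idxN adj.length w
    · subst hiw
      have hfrw := rFr (idxN adj.length w) hw_notin_trest
      have hcond : idxN adj.length w ∈ List.map (idxN adj.length) (w :: (tsub ++ trest)) := by
        rw [htmem]; exact Or.inl rfl
      refine ⟨?_, ?_, ?_⟩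
      · rw [hself.1, hdv, if_pos hcond, hfrw.2.2.1, hdw.1]
      · rw [hself.2.1, hdv, if_pos hcond, hfrw.2.2.2.1, hdw.2.1]
      · rw [hself.2.2, hdv, if_pos hcond, hfrw.2.2.2.2, hdw.2.2]
    · have hdf := dpAt_frame cs Z.1 Z.2.1 Z.2.2 w adj.length zLI zLE zLJ hw0 hwlt i hiw
      have hz := zpt i
      have hy := ypt i
      by_cases hisub : i ∈ tsub.map (idxN adj.length)
      · have hb := hBsurv i hisub
        have hcond : i ∈ List.map (idxN adj.length) (w :: (tsub ++ trest)) := by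
          rw [htmem]; exact Or.inr (Or.inl hisub)
        refine ⟨?_, ?_, ?_⟩
        · rw [hdf.1, hz.1, if_pos hisub, if_pos hcond, hb.1]
        · rw [hdf.2.1, hz.2.1, if_pos hisub, if_pos hcond, hb.2.1]
        · rw [hdf.2.2, hz.2.2, if_pos hisub, if_pos hcond, hb.2.2]
      · by_cases hirest : i ∈ trest.map (idxN adj.length)
        · have hcond : i ∈ List.map (idxN adj.length) (w :: (tsub ++ trest)) := by
            rw [htmem]; exact Or.inr (Or.inr hirest)
          refine ⟨?_, ?_, ?_⟩
          · rw [hdf.1, hz.1, if_neg hisub, hy.1, if_pos hirest, if_pos hcond]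
          · rw [hdf.2.1, hz.2.1, if_neg hisub, hy.2.1, if_pos hirest, if_pos hcond]
          · rw [hdf.2.2, hz.2.2, if_neg hisub, hy.2.2, if_pos hirest, if_pos hcond]
        · have hcond : i ∉ List.map (idxN adj.length) (w :: (tsub ++ trest)) := by
            rw [htmem]
            rintro (h | h | h)
            · exact hiw h
            · exact hisub h
            · exact hirest h
          refine ⟨?_, ?_, ?_⟩
          · rw [hdf.1, hz.1, if_neg hisub, hy.1, if_neg hirest, if_neg hcond]
          · rw [hdf.2.1, hz.2.1, if_neg hisub, hy.2.1, if_neg hirest, if_neg hcond]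
          · rw [hdf.2.2, hz.2.2, if_neg hisub, hy.2.2, if_neg hirest, if_neg hcond]

-- ===== VERDICT =====
theorem tree_dp_spec : Claim_equal_tree_dp := by
  intro adj root _hdom hpre
  obtain ⟨hr0, hrlt, _hrows, _hconn⟩ := hpre
  have hrn : idxN adj.length root < adj.length := idxN_lt adj.length root hr0 hrlt
  unfold Spec_tree_dp
  simp only [tree_dp, tree_dp_alt]
  set vis0 := PySem.List.pySetD (List.replicate adj.length false) root true with hv0
  have hv0eq : vis0 = (List.replicate adj.length false).set (idxN adj.length root) true :=
    pySetD_wrapn (List.replicate adj.length false) true (by simp) hr0 hrlt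
  have hlv0 : vis0.length = adj.length := by rw [hv0eq]; simp
  have hvroot : vis0[idxN adj.length root]? = some true := by
    rw [hv0eq, List.getElem?_set]
    simp [hrn]
  have hrepl : ∀ i : Nat, i < adj.length →
      (List.replicate adj.length ([] : List Int))[i]? = some [] := by
    intro i hi
    simp [hi]
  have hcf0 : cfalse vis0 + 1 ≤ adj.length + 1 := by
    have h1 : cfalse vis0 ≤ vis0.length := List.count_le_length
    omega
  have CR := cruxList adj (2 * cfalse vis0 + 1) vis0 (List.replicate adj.length [])
    (List.replicate adj.length []) (List.replicate adj.length []) (List.replicate adj.length [])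
    [] [root] (adj.length + 1) (by simp) hlv0 (by simp) (by simp) (by simp) (by simp)
    (by
      intro w hw
      simp only [List.mem_singleton] at hw
      rw [hw]
      exact ⟨hr0, hrlt, hvroot, hrepl (idxN adj.length root) hrn⟩)
    (by simp)
    (by
      intro i hi
      have hlt : i < vis0.length := (List.getElem?_eq_some_iff.mp hi).1
      exact hrepl i (hlv0 ▸ hlt))
    (fun _ => hcf0)
  obtain ⟨cB1, cB2, cL1, cL2, cLI, cLE, cLJ, cCf, t, cOrd, cWs, cProp, cNd, cMk, cFr, cDP⟩ := CR
  have hsingle : visitList adj (adj.length + 1) vis0 (List.replicate adj.length [])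
      (List.replicate adj.length []) (List.replicate adj.length [])
      (List.replicate adj.length []) [root] =
      visitB adj (adj.length + 1) vis0 (List.replicate adj.length [])
        (List.replicate adj.length []) (List.replicate adj.length [])
        (List.replicate adj.length []) root := by
    rw [visitList_cons, visitList_nil]
  obtain ⟨dLI, dLE, dLJ, dpt⟩ := cDP
    (loopA adj vis0 (List.replicate adj.length []) [] [root]).2.1
    (List.replicate adj.length []) (List.replicate adj.length []) (List.replicate adj.length [])
    cL2 (fun u _ => rfl) (by simp) (by simp) (by simp)
  rw [cOrd, List.nil_append] at *
  simp only [Prod.mk.injEq]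
  rw [← hsingle]
  refine ⟨?_, ?_, ?_, cB2.symm⟩
  · apply List.ext_getElem?
    intro i
    rw [(dpt i).1]
    by_cases hm : i ∈ t.map (idxN adj.length)
    · rw [if_pos hm]
    · rw [if_neg hm, (cFr i hm).2.2.1]
  · apply List.ext_getElem?
    intro i
    rw [(dpt i).2.1]
    by_cases hm : i ∈ t.map (idxN adj.length)
    · rw [if_pos hm]
    · rw [if_neg hm, (cFr i hm).2.2.2.1]
  · apply List.ext_getElem?
    intro i
    rw [(dpt i).2.2]
    by_cases hm : i ∈ t.map (idxN adj.length)
    · rw [if_pos hm]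
    · rw [if_neg hm, (cFr i hm).2.2.2.2]
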